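-- pv_equiv track=rewrite | github.com/franklinvp/foobar | challenge5_checksum_xor_consecutive_numbers.py | checksum_xor_consecutive_numbers
-- ===== SOURCE A (Python) =====
-- def checksum_xor_consecutive_numbers(start, length):
--     """
--     The numbers start, start+1, start+2,...
--     are placed in a square of side length.
--     Consider the top-left half of the matrix,
--     including the anti-diagonal.
--     This function returns the xor of all those numbers.
--     The challenge said that the total number of entries
--     of the matrix was not going to be larger than 2000000000.
--     Or maybe that the sum of the element was not going to be
--     larger than that. Something like that to tell you
--     that there could be a large number of elements to xor,
--     but also not insanely many. Reducing from quadratic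
--     to linear turned out to be enough.
--     """
--     def xorconsec(a,b):
--         """
--         This function return the xor of all integers
--         between a, and b, including both.
--         """
--         # The xor-ory gets reduced by taking into account
--         # that an even number xor-ed with its successor
--         # results in 1, and that 1 xor 1 = 0.
--         if a > b:
--             return 0
--         L = b-a+1
--         R = L%4
--         aeven = a%2
--         if R == 0:
--             if aeven == 0:
--                 return 0
--             else:
--                 return a^b^1
--         elif R == 1:
--             if aeven == 0:
--                 return b
--             else:
--                 return a
--         elif R == 2:
--             if aeven == 0:
--                 return (b-1)^b
--             else:
--                 return a^b
--         elif R == 3: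
--             if aeven == 0:
--                 return b^1
--             else:
--                 return a^1
--     checksum = 0
--     for size in range(length, 0, -1):
--         a = start
--         b = start + size - 1
--         result = xorconsec(a,b)
--         checksum ^= result
--         start += length
--     return checksum
-- ===== SOURCE B (Python) =====
-- def checksum_xor_consecutive_numbers(start, length):
--     """
--     Complement decomposition with a prefix-XOR helper: XOR the whole square
--     (one contiguous run) and XOR out each row's strictly-lower-right part.
--     The run XOR is computed from the classic prefix f(n) = 0^1^...^n (n % 4
--     table), extended to negative endpoints via the bitwise-NOT bijection
--     mapping a negative run onto a nonnegative one.
--     """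
--     def pref(n):
--         # XOR of 0..n for n >= 0; 0 for n < 0.
--         if n < 0:
--             return 0
--         r = n % 4
--         if r == 0:
--             return n
--         if r == 1:
--             return 1
--         if r == 2:
--             return n + 1
--         return 0
--
--     def xr(a, b):
--         # XOR of all integers a..b inclusive (0 if a > b).
--         if a > b:
--             return 0
--         if a >= 0:
--             return pref(b) ^ pref(a - 1)
--         if b < 0:
--             y = xr(-b - 1, -a - 1)
--             return y if (b - a + 1) % 2 == 0 else ~y
--         return xr(a, -1) ^ xr(0, b)
--
--     if length <= 0:
--         return 0
--     total = xr(start, start + length * length - 1)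
--     for r in range(length):
--         lo = start + r * length + (length - r)
--         total ^= xr(lo, lo + r - 1)
--     return total
-- ===== Notes on version B (the rewrite author's own statement) =====
-- stated objective: alternative
-- what changed: B computes the XOR of the whole square as one call on the contiguous run and XORs OUT each row's strictly-lower-right part, and its range-XOR helper is a prefix-XOR closed form f(n)=0^...^n (n%4 table) extended to negative endpoints through the bitwise-NOT bijection, instead of A's per-row accumulation with a length%4 / parity-of-a case table and a mutated running start.
import Mathlib
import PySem

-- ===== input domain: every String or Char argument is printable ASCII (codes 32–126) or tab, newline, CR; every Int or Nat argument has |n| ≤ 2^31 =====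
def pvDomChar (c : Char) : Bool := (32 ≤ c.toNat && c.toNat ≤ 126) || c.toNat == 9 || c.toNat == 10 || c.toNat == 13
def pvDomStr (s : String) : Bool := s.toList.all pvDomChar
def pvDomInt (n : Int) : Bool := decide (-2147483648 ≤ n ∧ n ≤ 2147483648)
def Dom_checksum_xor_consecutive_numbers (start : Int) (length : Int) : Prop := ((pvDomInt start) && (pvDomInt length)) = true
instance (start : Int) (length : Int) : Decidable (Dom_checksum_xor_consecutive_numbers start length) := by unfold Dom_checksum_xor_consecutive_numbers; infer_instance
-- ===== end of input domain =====

-- B re-decomposes the triangle XOR as (whole square) XOR (each row's strictly-lower-right part),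
-- with a prefix-XOR closed-form range helper instead of A's case-table helper; same cost class.

-- ===== PORT A =====
-- A's inner helper xorconsec (L, R, aeven inlined; Python's % on a positive divisor = PySem.Int.mod).
-- Python's trailing `elif R == 3` is the final else here: R = L % 4 with L ≥ 1 is always 0, 1, 2 or 3.
def pvXorconsecA (a : Int) (b : Int) : Int :=
  if a > b then 0
  else
    if PySem.Int.mod (b - a + 1) 4 = 0 then
      if PySem.Int.mod a 2 = 0 then 0 else PySem.Int.bxor (PySem.Int.bxor a b) 1
    else if PySem.Int.mod (b - a + 1) 4 = 1 then
      if PySem.Int.mod a 2 = 0 then b else a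
    else if PySem.Int.mod (b - a + 1) 4 = 2 then
      if PySem.Int.mod a 2 = 0 then PySem.Int.bxor (b - 1) b else PySem.Int.bxor a b
    else
      if PySem.Int.mod a 2 = 0 then PySem.Int.bxor b 1 else PySem.Int.bxor a 1

-- the `for size in range(length, 0, -1)` loop with its mutated `start` and `checksum` as state
def pvLoopA (length : Int) (size : Int) (start : Int) (checksum : Int) : Int :=
  if h : 0 < size then
    pvLoopA length (size - 1) (start + length)
      (PySem.Int.bxor checksum (pvXorconsecA start (start + size - 1)))
  else checksum
termination_by size.toNat
decreasing_by omega

def checksum_xor_consecutive_numbers (start : Int) (length : Int) : Int :=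
  pvLoopA length length start 0

-- ===== PORT B =====
-- Source B's pref: XOR of 0..n for n ≥ 0 via the n % 4 table, 0 for n < 0
def pvPref (n : Int) : Int :=
  if n < 0 then 0
  else
    if PySem.Int.mod n 4 = 0 then n
    else if PySem.Int.mod n 4 = 1 then 1
    else if PySem.Int.mod n 4 = 2 then n + 1
    else 0

-- Source B's xr: range XOR from prefix XORs; negative runs go through the bitwise-NOT
-- bijection (Python's ~y is exactly -y-1 on ints), a mixed run is split at -1/0.
def pvXr (a : Int) (b : Int) : Int :=
  if a > b then 0
  else if 0 ≤ a then PySem.Int.bxor (pvPref b) (pvPref (a - 1))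
  else if b < 0 then
    let y := pvXr (-b - 1) (-a - 1)
    if PySem.Int.mod (b - a + 1) 2 = 0 then y else -y - 1
  else PySem.Int.bxor (pvXr a (-1)) (pvXr 0 b)
termination_by ((if a < 0 then (if 0 ≤ b then 2 else 1) else 0) : Nat)
decreasing_by
  · split_ifs <;> omega
  · split_ifs <;> omega
  · split_ifs <;> omega

-- the `for r in range(length)` loop XOR-ing out each row's strictly-lower-right run lo..lo+r-1
def pvLoopB (start : Int) (length : Int) (r : Int) (total : Int) : Int :=
  if h : r < length then
    let lo := start + r * length + (length - r)
    pvLoopB start length (r + 1) (PySem.Int.bxor total (pvXr lo (lo + r - 1)))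
  else total
termination_by (length - r).toNat
decreasing_by omega

def checksum_xor_consecutive_numbers_alt (start : Int) (length : Int) : Int :=
  if length ≤ 0 then 0
  else pvLoopB start length 0 (pvXr start (start + length * length - 1))

-- ===== PRECONDITION & SPEC =====
def Spec_checksum_xor_consecutive_numbers (start : Int) (length : Int) (out : Int) : Prop := out = checksum_xor_consecutive_numbers_alt start length
instance (start : Int) (length : Int) (out : Int) : Decidable (Spec_checksum_xor_consecutive_numbers start length out) := by unfold Spec_checksum_xor_consecutive_numbers; infer_instance

-- ===== CLAIM (what is proved, stated in full; the proofs are below) =====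
def Claim_equal_checksum_xor_consecutive_numbers : Prop := ∀ (start : Int) (length : Int), Dom_checksum_xor_consecutive_numbers start length → Spec_checksum_xor_consecutive_numbers start length (checksum_xor_consecutive_numbers start length)

-- ===== LEMMAS AND PROOFS =====

-- normal forms of bxor on the four sign patterns
lemma pvBxorNN (m n : Nat) : PySem.Int.bxor (m : Int) (n : Int) = ((m ^^^ n : Nat) : Int) :=
  PySem.Int.bxor_natCast m n

lemma pvBxorNP (m n : Nat) : PySem.Int.bxor (m : Int) (-(n : Int) - 1) = -((m ^^^ n : Nat) : Int) - 1 := by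
  have h2 : ¬ (0:Int) ≤ -(n:Int) - 1 := by omega
  have e : -(-(n:Int) - 1) - 1 = ((n:Nat) : Int) := by ring
  simp only [PySem.Int.bxor, Nat.cast_nonneg, if_true, if_pos (Int.natCast_nonneg m), if_neg h2, e,
    Int.toNat_natCast]

lemma pvBxorPN (m n : Nat) : PySem.Int.bxor (-(m : Int) - 1) (n : Int) = -((m ^^^ n : Nat) : Int) - 1 := by
  have h1 : ¬ (0:Int) ≤ -(m:Int) - 1 := by omega
  have e : -(-(m:Int) - 1) - 1 = ((m:Nat) : Int) := by ring
  simp only [PySem.Int.bxor, if_neg h1, if_pos (Int.natCast_nonneg n), e, Int.toNat_natCast]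

lemma pvBxorPP (m n : Nat) : PySem.Int.bxor (-(m : Int) - 1) (-(n : Int) - 1) = ((m ^^^ n : Nat) : Int) := by
  have h1 : ¬ (0:Int) ≤ -(m:Int) - 1 := by omega
  have h2 : ¬ (0:Int) ≤ -(n:Int) - 1 := by omega
  have em : -(-(m:Int) - 1) - 1 = ((m:Nat) : Int) := by ring
  have en : -(-(n:Int) - 1) - 1 = ((n:Nat) : Int) := by ring
  simp only [PySem.Int.bxor, if_neg h1, if_neg h2, em, en, Int.toNat_natCast]

lemma pvBxorN1 (m : Nat) : PySem.Int.bxor (m : Int) 1 = ((m ^^^ 1 : Nat) : Int) := by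
  have h := pvBxorNN m 1
  rwa [Nat.cast_one] at h

lemma pvBxorP1 (m : Nat) : PySem.Int.bxor (-(m : Int) - 1) 1 = -((m ^^^ 1 : Nat) : Int) - 1 := by
  have h := pvBxorPN m 1
  rwa [Nat.cast_one] at h

lemma pvIntRep (x : Int) : (∃ m : Nat, x = (m:Int)) ∨ (∃ m : Nat, x = -(m:Int) - 1) := by
  rcases (by omega : 0 ≤ x ∨ x < 0) with h | h
  · exact Or.inl ⟨x.toNat, by omega⟩
  · exact Or.inr ⟨(-x - 1).toNat, by omega⟩

lemma pvBxor_assoc (a b c : Int) :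
    PySem.Int.bxor (PySem.Int.bxor a b) c = PySem.Int.bxor a (PySem.Int.bxor b c) := by
  rcases pvIntRep a with ⟨m, rfl⟩ | ⟨m, rfl⟩ <;> rcases pvIntRep b with ⟨n, rfl⟩ | ⟨n, rfl⟩ <;>
    rcases pvIntRep c with ⟨p, rfl⟩ | ⟨p, rfl⟩ <;>
    simp only [pvBxorNN, pvBxorNP, pvBxorPN, pvBxorPP, Nat.xor_assoc]

lemma pvBxor_zero_left (a : Int) : PySem.Int.bxor 0 a = a := by
  rw [PySem.Int.bxor_comm]; exact PySem.Int.bxor_zero a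

lemma pvBxor_left_comm (a b c : Int) :
    PySem.Int.bxor a (PySem.Int.bxor b c) = PySem.Int.bxor b (PySem.Int.bxor a c) := by
  rw [← pvBxor_assoc, PySem.Int.bxor_comm a b, pvBxor_assoc]

lemma pvBxor_cancel_left (a b : Int) : PySem.Int.bxor a (PySem.Int.bxor a b) = b := by
  rw [← pvBxor_assoc, PySem.Int.bxor_self, pvBxor_zero_left]

-- bitwise NOT (x ↦ -x-1) commutes through bxor
lemma pvBxor_not_left (x y : Int) :
    PySem.Int.bxor (-x - 1) y = -(PySem.Int.bxor x y) - 1 := by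
  rcases pvIntRep x with ⟨m, rfl⟩ | ⟨m, rfl⟩ <;> rcases pvIntRep y with ⟨n, rfl⟩ | ⟨n, rfl⟩
  · rw [pvBxorPN, pvBxorNN]
  · rw [pvBxorPP, pvBxorNP]; ring
  · have e : -(-(m:Int) - 1) - 1 = (m:Int) := by ring
    rw [e, pvBxorNN, pvBxorPN]; ring
  · have e : -(-(m:Int) - 1) - 1 = (m:Int) := by ring
    rw [e, pvBxorNP, pvBxorPP]

lemma pvBxor_not_right (x y : Int) :
    PySem.Int.bxor x (-y - 1) = -(PySem.Int.bxor x y) - 1 := by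
  rw [PySem.Int.bxor_comm, pvBxor_not_left, PySem.Int.bxor_comm]

-- even/odd neighbours under xor-with-1
lemma pvNatXorSucc (k : Nat) : (2 * k) ^^^ (2 * k + 1) = 1 := by
  apply Nat.eq_of_testBit_eq
  intro i
  cases i with
  | zero =>
      have h1 : (2 * k) % 2 = 0 := by omega
      have h2 : (2 * k + 1) % 2 = 1 := by omega
      simp [Nat.testBit_xor, Nat.testBit_zero, h1, h2]
  | succ j =>
      have h1 : (2 * k) / 2 = k := by omega
      have h2 : (2 * k + 1) / 2 = k := by omega
      have h3 : (1 : Nat) / 2 = 0 := by omega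
      rw [Nat.testBit_xor]
      simp [Nat.testBit_add_one, h1, h2, h3]

lemma pvEvenSucc (a : Int) (ha : a % 2 = 0) : a + 1 = PySem.Int.bxor a 1 := by
  rcases (by omega : 0 ≤ a ∨ a < 0) with h | h
  · obtain ⟨m, rfl⟩ : ∃ m : Nat, a = (m : Int) := ⟨a.toNat, by omega⟩
    obtain ⟨k, rfl⟩ : ∃ k, m = 2 * k := ⟨m / 2, by omega⟩
    have hx : (2 * k) ^^^ 1 = 2 * k + 1 := by
      calc (2 * k) ^^^ 1 = (2 * k) ^^^ ((2 * k) ^^^ (2 * k + 1)) := by rw [pvNatXorSucc k]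
        _ = 2 * k + 1 := by rw [← Nat.xor_assoc, Nat.xor_self, Nat.zero_xor]
    rw [pvBxorN1, hx]; push_cast; ring
  · obtain ⟨m, rfl⟩ : ∃ m : Nat, a = -(m : Int) - 1 := ⟨(-a - 1).toNat, by omega⟩
    obtain ⟨k, rfl⟩ : ∃ k, m = 2 * k + 1 := ⟨m / 2, by omega⟩
    have hx : (2 * k + 1) ^^^ 1 = 2 * k := by
      calc (2 * k + 1) ^^^ 1 = (2 * k + 1) ^^^ ((2 * k) ^^^ (2 * k + 1)) := by rw [pvNatXorSucc k]
        _ = 2 * k := by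
            rw [Nat.xor_comm (2 * k) (2 * k + 1), ← Nat.xor_assoc, Nat.xor_self, Nat.zero_xor]
    rw [pvBxorP1, hx]; push_cast; ring

lemma pvOddPred (b : Int) (hb : b % 2 = 1) : b - 1 = PySem.Int.bxor b 1 := by
  rcases (by omega : 0 ≤ b ∨ b < 0) with h | h
  · obtain ⟨m, rfl⟩ : ∃ m : Nat, b = (m : Int) := ⟨b.toNat, by omega⟩
    obtain ⟨k, rfl⟩ : ∃ k, m = 2 * k + 1 := ⟨m / 2, by omega⟩
    have hx : (2 * k + 1) ^^^ 1 = 2 * k := by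
      calc (2 * k + 1) ^^^ 1 = (2 * k + 1) ^^^ ((2 * k) ^^^ (2 * k + 1)) := by rw [pvNatXorSucc k]
        _ = 2 * k := by
            rw [Nat.xor_comm (2 * k) (2 * k + 1), ← Nat.xor_assoc, Nat.xor_self, Nat.zero_xor]
    rw [pvBxorN1, hx]; push_cast; ring
  · obtain ⟨m, rfl⟩ : ∃ m : Nat, b = -(m : Int) - 1 := ⟨(-b - 1).toNat, by omega⟩
    obtain ⟨k, rfl⟩ : ∃ k, m = 2 * k := ⟨m / 2, by omega⟩
    have hx : (2 * k) ^^^ 1 = 2 * k + 1 := by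
      calc (2 * k) ^^^ 1 = (2 * k) ^^^ ((2 * k) ^^^ (2 * k + 1)) := by rw [pvNatXorSucc k]
        _ = 2 * k + 1 := by rw [← Nat.xor_assoc, Nat.xor_self, Nat.zero_xor]
    rw [pvBxorP1, hx]; push_cast; ring

-- left-step characterisation of A's closed-form helper
lemma pvXc_nil (a b : Int) (h : b < a) : pvXorconsecA a b = 0 := by
  unfold pvXorconsecA; rw [if_pos (by omega)]

lemma pvXc_step (a b : Int) (h : a ≤ b) :
    pvXorconsecA a b = PySem.Int.bxor a (pvXorconsecA (a + 1) b) := by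
  have m4 : ∀ x : Int, PySem.Int.mod x 4 = x % 4 := fun x => PySem.Int.mod_eq_emod_of_pos (by norm_num)
  have m2 : ∀ x : Int, PySem.Int.mod x 2 = x % 2 := fun x => PySem.Int.mod_eq_emod_of_pos (by norm_num)
  rcases eq_or_lt_of_le h with rfl | hlt
  · simp only [pvXorconsecA, m4, m2]
    rw [if_neg (by omega : ¬ a > a), if_pos (by omega : a + 1 > a)]
    have e1 : (a - a + 1) % 4 = 1 := by omega
    rw [e1]
    norm_num
  · have hnb : ¬ a > b := by omega
    have hnb2 : ¬ a + 1 > b := by omega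
    have hR : (b - a + 1) % 4 = 0 ∨ (b - a + 1) % 4 = 1 ∨ (b - a + 1) % 4 = 2 ∨
        (b - a + 1) % 4 = 3 := by omega
    have hp : a % 2 = 0 ∨ a % 2 = 1 := by omega
    simp only [pvXorconsecA, m4, m2]
    rw [if_neg hnb, if_neg hnb2]
    rcases hR with hR | hR | hR | hR <;> rcases hp with hp | hp
    · have hR' : (b - (a + 1) + 1) % 4 = 3 := by omega
      have hp' : (a + 1) % 2 = 1 := by omega
      rw [hR, hR', hp, hp']
      norm_num
      rw [pvEvenSucc a hp]
      simp [pvBxor_assoc, PySem.Int.bxor_comm, pvBxor_left_comm, PySem.Int.bxor_self,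
        PySem.Int.bxor_zero, pvBxor_zero_left, pvBxor_cancel_left]
    · have hR' : (b - (a + 1) + 1) % 4 = 3 := by omega
      have hp' : (a + 1) % 2 = 0 := by omega
      rw [hR, hR', hp, hp']
      norm_num
      simp [pvBxor_assoc, PySem.Int.bxor_comm, pvBxor_left_comm, PySem.Int.bxor_self,
        PySem.Int.bxor_zero, pvBxor_zero_left, pvBxor_cancel_left]
    · have hR' : (b - (a + 1) + 1) % 4 = 0 := by omega
      have hp' : (a + 1) % 2 = 1 := by omega
      rw [hR, hR', hp, hp']
      norm_num
      rw [pvEvenSucc a hp]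
      simp [pvBxor_assoc, PySem.Int.bxor_comm, pvBxor_left_comm, PySem.Int.bxor_self,
        PySem.Int.bxor_zero, pvBxor_zero_left, pvBxor_cancel_left]
    · have hR' : (b - (a + 1) + 1) % 4 = 0 := by omega
      have hp' : (a + 1) % 2 = 0 := by omega
      rw [hR, hR', hp, hp']
      norm_num
    · have hR' : (b - (a + 1) + 1) % 4 = 1 := by omega
      have hp' : (a + 1) % 2 = 1 := by omega
      have hb2 : b % 2 = 1 := by omega
      rw [hR, hR', hp, hp']
      norm_num
      rw [pvEvenSucc a hp, pvOddPred b hb2]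
      simp [pvBxor_assoc, PySem.Int.bxor_comm, pvBxor_left_comm, PySem.Int.bxor_self,
        PySem.Int.bxor_zero, pvBxor_zero_left, pvBxor_cancel_left]
    · have hR' : (b - (a + 1) + 1) % 4 = 1 := by omega
      have hp' : (a + 1) % 2 = 0 := by omega
      rw [hR, hR', hp, hp']
      norm_num
    · have hR' : (b - (a + 1) + 1) % 4 = 2 := by omega
      have hp' : (a + 1) % 2 = 1 := by omega
      rw [hR, hR', hp, hp']
      norm_num
      rw [pvEvenSucc a hp]
      simp [pvBxor_assoc, PySem.Int.bxor_comm, pvBxor_left_comm, PySem.Int.bxor_self,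
        PySem.Int.bxor_zero, pvBxor_zero_left, pvBxor_cancel_left]
    · have hR' : (b - (a + 1) + 1) % 4 = 2 := by omega
      have hp' : (a + 1) % 2 = 0 := by omega
      have hb2 : b % 2 = 1 := by omega
      rw [hR, hR', hp, hp']
      norm_num
      rw [pvOddPred b hb2]
      simp [pvBxor_assoc, PySem.Int.bxor_comm, pvBxor_left_comm, PySem.Int.bxor_self,
        PySem.Int.bxor_zero, pvBxor_zero_left, pvBxor_cancel_left]

lemma pvXc_split_aux (n : Nat) : ∀ (a b c : Int), a - 1 ≤ b → b ≤ c → (b - a + 1).toNat = n →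
    pvXorconsecA a c = PySem.Int.bxor (pvXorconsecA a b) (pvXorconsecA (b + 1) c) := by
  induction n with
  | zero =>
      intro a b c h1 h2 hn
      have hb : b = a - 1 := by omega
      subst hb
      rw [pvXc_nil a (a - 1) (by omega), pvBxor_zero_left]
      have e : a - 1 + 1 = a := by ring
      rw [e]
  | succ n ih =>
      intro a b c h1 h2 hn
      have hab : a ≤ b := by omega
      rw [pvXc_step a c (by omega), pvXc_step a b hab,
        ih (a + 1) b c (by omega) h2 (by omega), ← pvBxor_assoc]

lemma pvXc_split (a b c : Int) (h1 : a - 1 ≤ b) (h2 : b ≤ c) :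
    pvXorconsecA a c = PySem.Int.bxor (pvXorconsecA a b) (pvXorconsecA (b + 1) c) :=
  pvXc_split_aux (b - a + 1).toNat a b c h1 h2 rfl

lemma pvXc_single (a : Int) : pvXorconsecA a a = a := by
  rw [pvXc_step a a le_rfl, pvXc_nil (a + 1) a (by omega), PySem.Int.bxor_zero]

-- pvPref computes A's range XOR from 0 (for n ≥ -1)
lemma pvPref_step (a : Int) (ha : 0 ≤ a) : pvPref a = PySem.Int.bxor a (pvPref (a - 1)) := by
  have m4 : ∀ x : Int, PySem.Int.mod x 4 = x % 4 := fun x => PySem.Int.mod_eq_emod_of_pos (by norm_num)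
  have hR : a % 4 = 0 ∨ a % 4 = 1 ∨ a % 4 = 2 ∨ a % 4 = 3 := by omega
  simp only [pvPref, m4]
  rcases hR with hR | hR | hR | hR
  · rcases (by omega : a = 0 ∨ 4 ≤ a) with rfl | h4
    · norm_num
    · rw [if_neg (by omega : ¬ a < 0), if_pos hR, if_neg (by omega : ¬ a - 1 < 0),
        if_neg (by omega : ¬ (a - 1) % 4 = 0), if_neg (by omega : ¬ (a - 1) % 4 = 1),
        if_neg (by omega : ¬ (a - 1) % 4 = 2), PySem.Int.bxor_zero]
  · rw [if_neg (by omega : ¬ a < 0), if_neg (by omega : ¬ a % 4 = 0), if_pos hR,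
      if_neg (by omega : ¬ a - 1 < 0), if_pos (by omega : (a - 1) % 4 = 0)]
    rw [pvOddPred a (by omega), pvBxor_cancel_left]
  · rw [if_neg (by omega : ¬ a < 0), if_neg (by omega : ¬ a % 4 = 0),
      if_neg (by omega : ¬ a % 4 = 1), if_pos hR, if_neg (by omega : ¬ a - 1 < 0),
      if_neg (by omega : ¬ (a - 1) % 4 = 0), if_pos (by omega : (a - 1) % 4 = 1)]
    exact pvEvenSucc a (by omega)
  · rw [if_neg (by omega : ¬ a < 0), if_neg (by omega : ¬ a % 4 = 0),
      if_neg (by omega : ¬ a % 4 = 1), if_neg (by omega : ¬ a % 4 = 2),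
      if_neg (by omega : ¬ a - 1 < 0), if_neg (by omega : ¬ (a - 1) % 4 = 0),
      if_neg (by omega : ¬ (a - 1) % 4 = 1), if_pos (by omega : (a - 1) % 4 = 2)]
    have e : a - 1 + 1 = a := by ring
    rw [e, PySem.Int.bxor_self]

lemma pvPref_eq_aux (k : Nat) : ∀ n : Int, -1 ≤ n → (n + 1).toNat = k →
    pvPref n = pvXorconsecA 0 n := by
  induction k with
  | zero =>
      intro n h1 hk
      have : n = -1 := by omega
      subst this
      rw [pvXc_nil 0 (-1) (by omega)]
      simp [pvPref]
  | succ k ih =>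
      intro n h1 hk
      have hn : 0 ≤ n := by omega
      rw [pvPref_step n hn, ih (n - 1) (by omega) (by omega)]
      rw [pvXc_split 0 (n - 1) n (by omega) (by omega)]
      have e : n - 1 + 1 = n := by ring
      rw [e, pvXc_single, PySem.Int.bxor_comm]

lemma pvPref_eq (n : Int) (h : -1 ≤ n) : pvPref n = pvXorconsecA 0 n :=
  pvPref_eq_aux (n + 1).toNat n h rfl

-- pvXr on a nonnegative run
lemma pvXr_eq_nonneg (a b : Int) (ha : 0 ≤ a) (hab : a ≤ b) :
    pvXr a b = pvXorconsecA a b := by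
  rw [pvXr]
  rw [if_neg (by omega : ¬ a > b), if_pos ha]
  rw [pvPref_eq b (by omega), pvPref_eq (a - 1) (by omega)]
  rw [pvXc_split 0 (a - 1) b (by omega) (by omega)]
  have e : a - 1 + 1 = a := by ring
  rw [e, PySem.Int.bxor_comm (pvXorconsecA 0 (a - 1)), pvBxor_assoc, PySem.Int.bxor_self,
    PySem.Int.bxor_zero]

-- A's range XOR over a negative run, through the NOT bijection
lemma pvXcA_neg_aux (n : Nat) : ∀ a b : Int, a ≤ b → b < 0 → (b - a + 1).toNat = n →
    pvXorconsecA a b =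
      if n % 2 = 0 then pvXorconsecA (-b - 1) (-a - 1)
      else -(pvXorconsecA (-b - 1) (-a - 1)) - 1 := by
  induction n with
  | zero => intro a b hab hb hn; omega
  | succ n ih =>
      intro a b hab hb hn
      rcases eq_or_lt_of_le hab with rfl | hlt
      · have hn1 : n = 0 := by omega
        subst hn1
        rw [pvXc_single, if_neg (by omega : ¬ (0 + 1) % 2 = 0), pvXc_single]
        ring
      · have h1 : pvXorconsecA a b = PySem.Int.bxor a (pvXorconsecA (a + 1) b) :=
          pvXc_step a b hab
        have h2 : pvXorconsecA (-b - 1) (-a - 1) =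
            PySem.Int.bxor (pvXorconsecA (-b - 1) (-a - 2)) (-a - 1) := by
          rw [pvXc_split (-b - 1) (-a - 2) (-a - 1) (by omega) (by omega)]
          have e : -a - 2 + 1 = -a - 1 := by ring
          rw [e, pvXc_single]
        have hmap : -(a + 1) - 1 = -a - 2 := by ring
        have ihh := ih (a + 1) b (by omega) hb (by omega)
        rw [hmap] at ihh
        have key : ∀ z : Int, PySem.Int.bxor a z = -(PySem.Int.bxor (-a - 1) z) - 1 := by
          intro z
          have h := pvBxor_not_left (-a - 1) z
          have e : -(-a - 1) - 1 = a := by ring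
          rwa [e] at h
        by_cases hne : n % 2 = 0
        · have hno : ¬ (n + 1) % 2 = 0 := by omega
          rw [if_neg hno, h1, ihh, if_pos hne, h2, key, PySem.Int.bxor_comm]
        · have hne' : (n + 1) % 2 = 0 := by omega
          rw [if_pos hne', h1, ihh, if_neg hne, h2, pvBxor_not_right, key,
            PySem.Int.bxor_comm (-a - 1)]
          ring

-- pvXr computes the same range XOR as A's helper, on every input
lemma pvXr_eq (a b : Int) : pvXr a b = pvXorconsecA a b := by
  by_cases hab : a > b
  · rw [pvXr, if_pos hab, pvXc_nil a b (by omega)]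
  · by_cases ha : 0 ≤ a
    · exact pvXr_eq_nonneg a b ha (by omega)
    · by_cases hb : b < 0
      · rw [pvXr, if_neg hab, if_neg ha, if_pos hb]
        have hy : pvXr (-b - 1) (-a - 1) = pvXorconsecA (-b - 1) (-a - 1) :=
          pvXr_eq_nonneg (-b - 1) (-a - 1) (by omega) (by omega)
        have hneg := pvXcA_neg_aux (b - a + 1).toNat a b (by omega) hb rfl
        have m2 : PySem.Int.mod (b - a + 1) 2 = (b - a + 1) % 2 :=
          PySem.Int.mod_eq_emod_of_pos (by norm_num)
        simp only [hy, m2]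
        by_cases hp : (b - a + 1) % 2 = 0
        · rw [if_pos hp, hneg, if_pos (by omega)]
        · rw [if_neg hp, hneg, if_neg (by omega)]
      · rw [pvXr, if_neg hab, if_neg ha, if_neg hb]
        have h1 : pvXr a (-1) = pvXorconsecA a (-1) := by
          rw [pvXr, if_neg (by omega : ¬ a > -1), if_neg ha, if_pos (by omega : (-1:Int) < 0)]
          have hy : pvXr (-(-1) - 1) (-a - 1) = pvXorconsecA 0 (-a - 1) := by
            have e : -(-1:Int) - 1 = 0 := by ring
            rw [e]
            exact pvXr_eq_nonneg 0 (-a - 1) le_rfl (by omega)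
          have hneg := pvXcA_neg_aux ((-1:Int) - a + 1).toNat a (-1) (by omega) (by omega) rfl
          have e0 : -(-1:Int) - 1 = 0 := by ring
          rw [e0] at hneg
          have m2 : PySem.Int.mod ((-1:Int) - a + 1) 2 = ((-1:Int) - a + 1) % 2 :=
            PySem.Int.mod_eq_emod_of_pos (by norm_num)
          simp only [hy, m2]
          by_cases hp : ((-1:Int) - a + 1) % 2 = 0
          · rw [if_pos hp, hneg, if_pos (by omega)]
          · rw [if_neg hp, hneg, if_neg (by omega)]
        have h2 : pvXr 0 b = pvXorconsecA 0 b :=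
          pvXr_eq_nonneg 0 b le_rfl (by omega)
        have hs := pvXc_split a (-1) b (by omega) (by omega)
        norm_num at hs
        rw [h1, h2, ← hs]

-- accumulator extraction for B's loop
lemma pvLoopB_acc (n : Nat) : ∀ (st L r t : Int), (L - r).toNat = n →
    pvLoopB st L r t = PySem.Int.bxor t (pvLoopB st L r 0) := by
  induction n with
  | zero =>
      intro st L r t hn
      have h : ¬ r < L := by omega
      conv_lhs => rw [pvLoopB]
      conv_rhs => rw [pvLoopB]
      rw [dif_neg h, dif_neg h, PySem.Int.bxor_zero]
  | succ n ih =>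
      intro st L r t hn
      by_cases h : r < L
      · conv_lhs => rw [pvLoopB]
        conv_rhs => rw [pvLoopB]
        rw [dif_pos h, dif_pos h]
        dsimp only
        rw [ih st L (r + 1)
            (PySem.Int.bxor t (pvXr (st + r * L + (L - r)) (st + r * L + (L - r) + r - 1)))
            (by omega),
          ih st L (r + 1)
            (PySem.Int.bxor 0 (pvXr (st + r * L + (L - r)) (st + r * L + (L - r) + r - 1)))
            (by omega),
          pvBxor_zero_left, pvBxor_assoc]
      · conv_lhs => rw [pvLoopB]
        conv_rhs => rw [pvLoopB]
        rw [dif_neg h, dif_neg h, PySem.Int.bxor_zero]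

-- main invariant: A's remaining loop = (XOR of the remaining rows' full runs) XOR (B's remaining removals)
lemma pvMain (L : Int) (hL : 0 < L) : ∀ (n : Nat) (s c : Int), (n : Int) ≤ L →
    pvLoopA L (n : Int) s c =
      PySem.Int.bxor c
        (PySem.Int.bxor (pvXorconsecA s (s + (n : Int) * L - 1))
          (pvLoopB (s - (L - (n : Int)) * L) L (L - (n : Int)) 0)) := by
  intro n
  induction n with
  | zero =>
      intro s c hn
      simp only [Nat.cast_zero, zero_mul, add_zero, sub_zero]
      rw [pvLoopA, dif_neg (by omega : ¬ (0:Int) < 0)]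
      rw [pvXc_nil s (s - 1) (by omega)]
      rw [pvLoopB, dif_neg (by omega : ¬ L < L)]
      rw [pvBxor_zero_left, PySem.Int.bxor_zero]
  | succ n ih =>
      intro s c hn
      have hcast : ((n + 1 : Nat) : Int) = (n : Int) + 1 := by push_cast; ring
      rw [hcast] at hn ⊢
      have hn0 : (0:Int) ≤ (n : Int) := Int.natCast_nonneg n
      have hnL : 0 ≤ (n : Int) * L := mul_nonneg hn0 hL.le
      rw [pvLoopA, dif_pos (by omega : (0:Int) < (n:Int) + 1)]
      have e1 : (n : Int) + 1 - 1 = (n : Int) := by ring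
      rw [e1]
      rw [ih (s + L) (PySem.Int.bxor c (pvXorconsecA s (s + ((n:Int) + 1) - 1))) (by omega)]
      have e2 : s + L + (n : Int) * L - 1 = s + ((n:Int) + 1) * L - 1 := by ring
      have e3 : s + L - (L - (n:Int)) * L = s - (L - ((n:Int) + 1)) * L := by ring
      rw [e2, e3]
      conv_rhs => rw [pvLoopB]
      rw [dif_pos (by omega : L - ((n:Int) + 1) < L)]
      dsimp only
      have e4 : s - (L - ((n:Int) + 1)) * L + (L - ((n:Int) + 1)) * L + (L - (L - ((n:Int) + 1)))
          = s + ((n:Int) + 1) := by ring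
      rw [e4]
      have e5 : s + ((n:Int) + 1) + (L - ((n:Int) + 1)) - 1 = s + L - 1 := by ring
      rw [e5]
      have e6 : L - ((n:Int) + 1) + 1 = L - (n:Int) := by ring
      rw [e6, pvXr_eq]
      rw [pvLoopB_acc (L - (L - (n:Int))).toNat (s - (L - ((n:Int) + 1)) * L) L (L - (n:Int))
        (PySem.Int.bxor 0 (pvXorconsecA (s + ((n:Int) + 1)) (s + L - 1))) rfl]
      rw [pvXc_split s (s + L - 1) (s + ((n:Int) + 1) * L - 1) (by omega)
        (by nlinarith [mul_nonneg hn0 hL.le])]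
      rw [pvXc_split s (s + ((n:Int) + 1) - 1) (s + L - 1) (by omega) (by omega)]
      have e7 : s + ((n:Int) + 1) - 1 + 1 = s + ((n:Int) + 1) := by ring
      have e8 : s + L - 1 + 1 = s + L := by ring
      rw [e7, e8]
      simp [pvBxor_assoc, PySem.Int.bxor_comm, pvBxor_left_comm, PySem.Int.bxor_self,
        PySem.Int.bxor_zero, pvBxor_zero_left, pvBxor_cancel_left]

-- ===== VERDICT (by name: the statement is the Claim_ definition above) =====
theorem checksum_xor_consecutive_numbers_spec : Claim_equal_checksum_xor_consecutive_numbers := by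
  unfold Claim_equal_checksum_xor_consecutive_numbers
  intro start length _
  unfold Spec_checksum_xor_consecutive_numbers
  unfold checksum_xor_consecutive_numbers checksum_xor_consecutive_numbers_alt
  by_cases hL : length ≤ 0
  · rw [if_pos hL, pvLoopA, dif_neg (by omega : ¬ (0:Int) < length)]
  · rw [if_neg hL]
    have hL' : (0:Int) < length := by omega
    have hcast : ((length.toNat : Nat) : Int) = length := by omega
    have hmain := pvMain length hL' length.toNat start 0 (by omega)
    rw [hcast] at hmain
    rw [hmain]
    have e2 : start - (length - length) * length = start := by ring
    have e1 : length - length = 0 := by ring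
    rw [e2, e1, pvXr_eq]
    rw [pvLoopB_acc (length - 0).toNat start length 0
      (pvXorconsecA start (start + length * length - 1)) rfl]
    rw [pvBxor_zero_left]
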